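-- pv_equiv track=rewrite | github.com/AishwaryaRK/Code | TopCoderPractice/StringManipulation/Pronunciation.py | canPronounce
-- ===== SOURCE A (Python) =====
-- def canPronounce(words):
--     vowels = ['a', 'e', 'i', 'o', 'u']
--     for word1 in words:
--         word = word1.lower()
--         for i, w in enumerate(word):
--             if w in vowels:
--                 if i + 1 < len(word):
--                     if word[i + 1] in vowels and word[i + 1] != w:
--                         return word1
--             elif i + 2 < len(word):
--                 if word[i + 1] not in vowels and word[i + 2] not in vowels:
--                     return word1
--     return ""
-- ===== SOURCE B (Python) =====
-- def canPronounce(words):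
--     vowels = set("aeiou")
--     for word in words:
--         # run-length decomposition: maximal runs of vowels / non-vowels
--         runs = []
--         for c in word.lower():
--             k = c in vowels
--             if runs and runs[-1][0] == k:
--                 runs[-1][1].append(c)
--             else:
--                 runs.append([k, [c]])
--         # a word is unpronounceable iff some consonant run has length >= 3
--         # or some vowel run contains two different vowels
--         for k, g in runs:
--             if (k and len(set(g)) > 1) or (not k and len(g) >= 3):
--                 return word
--     return ""
-- ===== Notes on version B (the rewrite author's own statement) =====
-- stated objective: alternative
-- what changed: Replaced A's single interleaved index scan with guarded lookaheads by a run-length decomposition: each word is first grouped into maximal vowel/consonant runs, then each run is judged on its own (a consonant run of length >= 3, or a vowel run containing two distinct vowels).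
import Mathlib
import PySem

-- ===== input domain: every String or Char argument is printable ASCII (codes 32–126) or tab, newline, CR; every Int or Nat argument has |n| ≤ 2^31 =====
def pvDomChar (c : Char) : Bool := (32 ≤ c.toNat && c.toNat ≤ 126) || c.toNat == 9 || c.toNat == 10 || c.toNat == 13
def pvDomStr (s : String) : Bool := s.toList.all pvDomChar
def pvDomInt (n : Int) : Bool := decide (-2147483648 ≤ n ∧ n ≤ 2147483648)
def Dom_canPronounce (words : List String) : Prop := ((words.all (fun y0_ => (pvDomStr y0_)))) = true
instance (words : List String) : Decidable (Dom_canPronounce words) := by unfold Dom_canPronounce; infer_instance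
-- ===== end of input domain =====

-- B replaces A's interleaved index loop (guarded i+1/i+2 lookaheads) by a run-length
-- decomposition: group each word into maximal vowel/consonant runs, then judge each run;
-- objective: alternative algorithm, same cost.

-- ===== PORT A =====
def pvVowels : List Char := ['a', 'e', 'i', 'o', 'u']

-- A's inner 'for i, w in enumerate(word)' loop; cs is the lowered word.
-- word[i+1]/word[i+2] are ported as pyGetD (the accesses are guarded in range, so the default is never used).
def pvALoop (cs : List Char) : List (Int × Char) → Bool
  | [] => false
  | (i, w) :: rest =>
    if pvVowels.contains w then
      if i + 1 < (cs.length : Int) then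
        if pvVowels.contains (PySem.List.pyGetD cs (i + 1) ' ')
            && PySem.List.pyGetD cs (i + 1) ' ' ≠ w then
          true
        else pvALoop cs rest
      else pvALoop cs rest
    else
      if i + 2 < (cs.length : Int) then
        if !pvVowels.contains (PySem.List.pyGetD cs (i + 1) ' ')
            && !pvVowels.contains (PySem.List.pyGetD cs (i + 2) ' ') then
          true
        else pvALoop cs rest
      else pvALoop cs rest

def canPronounce : List String → String
  | [] => ""
  | word1 :: ws =>
    let word := (PySem.Str.lower word1).toList
    if pvALoop word (PySem.List.enumerate word 0) then word1 else canPronounce ws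

-- ===== PORT B =====
def pvIsVowel (c : Char) : Bool := "aeiou".toList.contains c

-- B's run-building loop body: extend the last run if the kind matches, else open a new run.
def pvStep (runs : List (Bool × List Char)) (c : Char) : List (Bool × List Char) :=
  let k := pvIsVowel c
  match runs.getLast? with
  | some r => if r.1 = k then runs.dropLast ++ [(k, r.2 ++ [c])] else runs ++ [(k, [c])]
  | none => [(k, [c])]

-- B's per-run test: a vowel run with two distinct vowels, or a consonant run of length >= 3.
def pvBadRun (r : Bool × List Char) : Bool :=
  if r.1 then decide (1 < (PySem.Set.ofList r.2).length) else decide (3 ≤ r.2.length)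

def canPronounce_alt : List String → String
  | [] => ""
  | word :: ws =>
    let runs := ((PySem.Str.lower word).toList).foldl pvStep []
    if runs.any pvBadRun then word else canPronounce_alt ws

-- ===== PRECONDITION & SPEC =====
def Spec_canPronounce (words : List String) (out : String) : Prop := out = canPronounce_alt words
instance (words : List String) (out : String) : Decidable (Spec_canPronounce words out) := by unfold Spec_canPronounce; infer_instance

-- ===== CLAIM (what is proved, stated in full; the proofs are below) =====
def Claim_equal_canPronounce : Prop := ∀ (words : List String), Dom_canPronounce words → Spec_canPronounce words (canPronounce words)

-- ===== LEMMAS AND PROOFS =====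

-- A's two windowed conditions, as proof-side abbreviations.
def pvHasTriple (cs : List Char) : Bool :=
  ((cs.zip cs.tail).zip cs.tail.tail).any
    (fun p => !pvIsVowel p.1.1 && !pvIsVowel p.1.2 && !pvIsVowel p.2)

def pvHasPair (cs : List Char) : Bool :=
  (cs.zip cs.tail).any (fun p => pvIsVowel p.1 && pvIsVowel p.2 && p.1 ≠ p.2)

-- the common recursive spec both sides are reduced to
def pvTP : List Char → Bool
  | a :: b :: cs =>
    (pvIsVowel a && pvIsVowel b && a ≠ b)
      || ((!pvIsVowel a) && (!pvIsVowel b) &&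
            (match cs with | c :: _ => !pvIsVowel c | [] => false))
      || pvTP (b :: cs)
  | _ => false

lemma pvVowels_contains_eq (c : Char) : pvVowels.contains c = pvIsVowel c := by
  simp [pvVowels, pvIsVowel]

lemma pvHasPair_nil : pvHasPair [] = false := rfl
lemma pvHasPair_single (a : Char) : pvHasPair [a] = false := rfl
lemma pvHasPair_cons2 (a b : Char) (cs : List Char) :
    pvHasPair (a :: b :: cs) = ((pvIsVowel a && pvIsVowel b && a ≠ b) || pvHasPair (b :: cs)) := by
  simp [pvHasPair]

lemma pvHasTriple_nil : pvHasTriple [] = false := rfl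
lemma pvHasTriple_single (a : Char) : pvHasTriple [a] = false := rfl
lemma pvHasTriple_two (a b : Char) : pvHasTriple [a, b] = false := rfl
lemma pvHasTriple_cons3 (a b c : Char) (cs : List Char) :
    pvHasTriple (a :: b :: c :: cs)
      = ((!pvIsVowel a && !pvIsVowel b && !pvIsVowel c) || pvHasTriple (b :: c :: cs)) := by
  simp [pvHasTriple]

-- A's loop over the suffix 'suf' of cs starting at index pre.length equals the
-- two windowed scans of that suffix.
lemma pvALoop_suffix (suf pre : List Char) :
    pvALoop (pre ++ suf) (PySem.List.enumerate suf (pre.length : Int))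
      = (pvHasTriple suf || pvHasPair suf) := by
  induction suf generalizing pre with
  | nil => simp [pvALoop, pvHasTriple_nil, pvHasPair_nil, PySem.List.enumerate_nil]
  | cons w rest ih =>
    have hget1 : PySem.List.pyGetD (pre ++ w :: rest) ((pre.length : Int) + 1) ' '
        = rest.getD 0 ' ' := by
      have h : ((pre.length : Int) + 1) = ((pre.length + 1 : Nat) : Int) := by push_cast; ring
      rw [h, PySem.List.pyGetD_natCast]
      simp [List.getD, List.getElem?_append_right]
    have hget2 : PySem.List.pyGetD (pre ++ w :: rest) ((pre.length : Int) + 2) ' '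
        = rest.getD 1 ' ' := by
      have h : ((pre.length : Int) + 2) = ((pre.length + 2 : Nat) : Int) := by push_cast; ring
      rw [h, PySem.List.pyGetD_natCast]
      simp [List.getD, List.getElem?_append_right]
    have key : pvALoop (pre ++ w :: rest) (PySem.List.enumerate rest ((pre.length : Int) + 1))
        = (pvHasTriple rest || pvHasPair rest) := by
      have h := ih (pre ++ [w])
      rw [show (pre ++ [w]) ++ rest = pre ++ w :: rest by simp] at h
      simpa using h
    rw [PySem.List.enumerate_cons]
    match rest with
    | [] =>
      simp [pvALoop, PySem.List.enumerate_nil, pvHasTriple_single, pvHasPair_single]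
    | b :: rest' =>
      have hlen1 : (pre.length : Int) + 1 < ((pre ++ w :: b :: rest').length : Int) := by
        simp
      simp only [pvALoop, hget1, hget2, hlen1, if_pos, List.getD_cons_zero, key]
      match rest' with
      | [] =>
        have hlen2 : ¬ ((pre.length : Int) + 2 < ((pre ++ [w, b]).length : Int)) := by
          simp
        rw [pvHasTriple_two, pvHasPair_cons2, pvHasTriple_single, pvHasPair_single]
        simp only [pvVowels_contains_eq, Bool.or_false, Bool.false_or]
        by_cases hwb : w = b
        · subst hwb; cases hw : pvIsVowel w <;> simp
        · cases hw : pvIsVowel w <;> cases hb : pvIsVowel b <;>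
            simp [hwb, Ne.symm hwb]
      | c :: rest'' =>
        have hlen2 : (pre.length : Int) + 2 < ((pre ++ w :: b :: c :: rest'').length : Int) := by
          simp; omega
        simp only [hlen2, if_pos, List.getD_cons_succ, List.getD_cons_zero]
        rw [pvHasTriple_cons3, pvHasPair_cons2, pvVowels_contains_eq, pvVowels_contains_eq,
          pvVowels_contains_eq]
        split_ifs with h1 h2 h3 <;>
          cases hw : pvIsVowel w <;> cases hb : pvIsVowel b <;> cases hc : pvIsVowel c <;>
            simp_all [pvHasPair_cons2, ne_comm]

lemma pvALoop_eq (cs : List Char) :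
    pvALoop cs (PySem.List.enumerate cs 0) = (pvHasTriple cs || pvHasPair cs) := by
  simpa using pvALoop_suffix cs []

-- A's windowed conditions equal the common spec.
lemma pvTP_eq_windows (cs : List Char) : (pvHasTriple cs || pvHasPair cs) = pvTP cs := by
  induction cs with
  | nil => rfl
  | cons a t ih =>
    match t with
    | [] => rfl
    | b :: u =>
      match u with
      | [] =>
        rw [pvHasTriple_two, pvHasPair_cons2, pvHasPair_single]
        simp [pvTP]
      | c :: u' =>
        have ht : pvTP (a :: b :: c :: u')
            = ((pvIsVowel a && pvIsVowel b && decide (a ≠ b))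
              || ((!pvIsVowel a) && (!pvIsVowel b) && (!pvIsVowel c))
              || pvTP (b :: c :: u')) := rfl
        rw [pvHasTriple_cons3, pvHasPair_cons2, ht, ← ih]
        cases pvIsVowel a <;> cases pvIsVowel b <;> cases pvIsVowel c <;>
          simp [Bool.or_comm, Bool.or_left_comm]

-- pvStep on a state with a nonempty tail only touches that tail.
lemma pvStep_append (rs rest : List (Bool × List Char)) (h : rest ≠ []) (c : Char) :
    pvStep (rs ++ rest) c = rs ++ pvStep rest c := by
  match rest, h with
  | r :: rest', _ =>
    simp only [pvStep, List.getLast?_append_of_ne_nil _ (by simp : r :: rest' ≠ [])]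
    cases hlast : (r :: rest').getLast? with
    | none => simp at hlast
    | some x =>
      by_cases hk : x.1 = pvIsVowel c <;>
        simp [hk, List.dropLast_append_of_ne_nil, List.append_assoc]

lemma pvStep_ne_nil (rs : List (Bool × List Char)) (c : Char) : pvStep rs c ≠ [] := by
  unfold pvStep
  cases h : rs.getLast? with
  | none => simp
  | some x => by_cases hk : x.1 = pvIsVowel c <;> simp [hk]

lemma foldl_pvStep_append (cs : List Char) (rs rest : List (Bool × List Char)) (h : rest ≠ []) :
    List.foldl pvStep (rs ++ rest) cs = rs ++ List.foldl pvStep rest cs := by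
  induction cs generalizing rest with
  | nil => simp
  | cons c cs ih =>
    rw [List.foldl_cons, List.foldl_cons, pvStep_append rs rest h c,
      ih (pvStep rest c) (pvStep_ne_nil rest c)]

-- 'the set of g has more than one element' means 'g has two distinct elements'
lemma pvSetLen_gt1 (g : List Char) :
    1 < (PySem.Set.ofList g).length ↔ ∃ x ∈ g, ∃ y ∈ g, x ≠ y := by
  constructor
  · intro h
    match hS : PySem.Set.ofList g with
    | [] => rw [hS] at h; simp at h
    | [a] => rw [hS] at h; simp at h
    | a :: b :: t =>
      have hnd := PySem.Set.nodup_ofList g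
      rw [hS] at hnd
      have hab : a ≠ b := by
        rcases List.nodup_cons.mp hnd with ⟨ha, _⟩
        intro hab; exact ha (hab ▸ List.mem_cons_self)
      refine ⟨a, ?_, b, ?_, hab⟩
      · rw [← PySem.Set.mem_ofList g a, hS]; simp
      · rw [← PySem.Set.mem_ofList g b, hS]; simp
  · rintro ⟨x, hx, y, hy, hxy⟩
    rw [← PySem.Set.mem_ofList] at hx hy
    by_contra h
    rw [not_lt] at h
    match hS : PySem.Set.ofList g with
    | [] => rw [hS] at hx; simp at hx
    | [a] => rw [hS] at hx hy; simp_all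
    | a :: b :: t => rw [hS] at h; simp at h

-- on an all-vowel list the spec is 'two distinct elements exist'
lemma pvTP_vowel_run (g : List Char) (hu : ∀ x ∈ g, pvIsVowel x = true) :
    pvTP g = decide (∃ x ∈ g, ∃ y ∈ g, x ≠ y) := by
  induction g with
  | nil => simp [pvTP]
  | cons a t ih =>
    match t with
    | [] => simp [pvTP]
    | b :: u =>
      have ha : pvIsVowel a = true := hu a (by simp)
      have hb : pvIsVowel b = true := hu b (by simp)
      have ht : pvTP (a :: b :: u) = (decide (a ≠ b) || pvTP (b :: u)) := by
        simp [pvTP, ha, hb]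
      rw [ht, ih (fun x hx => hu x (List.mem_cons_of_mem a hx))]
      by_cases hab : a = b
      · subst hab
        have hda : (decide (a ≠ a)) = false := by simp
        rw [hda, Bool.false_or]
        apply decide_eq_decide.mpr
        constructor
        · rintro ⟨x, hx, y, hy, hxy⟩
          exact ⟨x, List.mem_cons_of_mem a hx, y, List.mem_cons_of_mem a hy, hxy⟩
        · rintro ⟨x, hx, y, hy, hxy⟩
          rcases List.mem_cons.mp hx with rfl | hx
          · rcases List.mem_cons.mp hy with rfl | hy
            · exact absurd rfl hxy
            · exact ⟨x, by simp, y, hy, hxy⟩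
          · rcases List.mem_cons.mp hy with rfl | hy
            · exact ⟨x, hx, y, by simp, hxy⟩
            · exact ⟨x, hx, y, hy, hxy⟩
      · have hd : (decide (a ≠ b)) = true := by simp [hab]
        rw [hd, Bool.true_or]
        symm
        simp only [decide_eq_true_eq]
        exact ⟨a, by simp, b, by simp, hab⟩

-- on an all-consonant list the spec is 'length >= 3'
lemma pvTP_consonant_run (g : List Char) (hu : ∀ x ∈ g, pvIsVowel x = false) :
    pvTP g = decide (3 ≤ g.length) := by
  match g with
  | [] => simp [pvTP]
  | [a] => simp [pvTP]
  | [a, b] =>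
    have ha := hu a (by simp)
    simp [pvTP, ha]
  | a :: b :: c :: t =>
    have ha := hu a (by simp)
    have hb := hu b (by simp)
    have hc := hu c (by simp)
    simp [pvTP, ha, hb, hc]

-- a uniform nonempty run scored by pvBadRun equals the spec of that run
lemma pvBadRun_eq_TP (k : Bool) (g : List Char) (hg : g ≠ [])
    (hu : ∀ x ∈ g, pvIsVowel x = k) : pvBadRun (k, g) = pvTP g := by
  cases k with
  | true =>
    rw [pvTP_vowel_run g hu]
    simp only [pvBadRun, if_pos]
    exact decide_eq_decide.mpr (pvSetLen_gt1 g)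
  | false =>
    rw [pvTP_consonant_run g hu]
    rfl

-- two distinct elements in x::y::g'' means x ≠ y or two distinct elements further on
lemma pvSet_cons2 (x y : Char) (g : List Char) :
    1 < (PySem.Set.ofList (x :: y :: g)).length ↔
      (x ≠ y ∨ 1 < (PySem.Set.ofList (y :: g)).length) := by
  rw [pvSetLen_gt1, pvSetLen_gt1]
  constructor
  · rintro ⟨u, hu1, w, hw1, huw⟩
    by_cases hxy : x = y
    · right
      subst hxy
      refine ⟨u, ?_, w, ?_, huw⟩ <;> simp_all [List.mem_cons]
    · exact Or.inl hxy
  · rintro (hxy | ⟨u, h1, w, h2, huw⟩)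
    · exact ⟨x, by simp, y, by simp, hxy⟩
    · exact ⟨u, List.mem_cons_of_mem x h1, w, List.mem_cons_of_mem x h2, huw⟩

-- spec across a run boundary
lemma pvTP_run_boundary (k : Bool) (g : List Char) (c : Char) (cs : List Char) (hg : g ≠ [])
    (hu : ∀ x ∈ g, pvIsVowel x = k) (hc : pvIsVowel c = !k) :
    pvTP (g ++ c :: cs) = (pvBadRun (k, g) || pvTP (c :: cs)) := by
  induction g with
  | nil => exact absurd rfl hg
  | cons x g' ih =>
    have hx : pvIsVowel x = k := hu x (by simp)
    match g' with
    | [] =>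
      have hbad : pvBadRun (k, [x]) = false := by
        cases k <;> simp [pvBadRun, PySem.Set.ofList, PySem.Set.add, PySem.Set.empty]
      rw [hbad, Bool.false_or]
      cases k with
      | true => simp [pvTP, hx, hc]
      | false => simp [pvTP, hx, hc]
    | y :: g'' =>
      have hy : pvIsVowel y = k := hu y (by simp)
      have ih' := ih (by simp) (fun z hz => hu z (List.mem_cons_of_mem x hz))
      have hT : pvTP (x :: y :: (g'' ++ c :: cs))
          = ((pvIsVowel x && pvIsVowel y && decide (x ≠ y))
            || ((!pvIsVowel x) && (!pvIsVowel y) &&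
                  (match g'' ++ c :: cs with | z :: _ => !pvIsVowel z | [] => false))
            || pvTP (y :: (g'' ++ c :: cs))) := rfl
      rw [List.cons_append] at ih'
      show pvTP (x :: y :: (g'' ++ c :: cs)) = _
      rw [hT, ih']
      cases k with
      | true =>
        have hgoal : (decide (x ≠ y) || pvBadRun (true, y :: g''))
            = pvBadRun (true, x :: y :: g'') := by
          simp only [pvBadRun, if_pos]
          rw [show (decide (x ≠ y) || decide (1 < (PySem.Set.ofList (y :: g'')).length))
              = decide (x ≠ y ∨ 1 < (PySem.Set.ofList (y :: g'')).length) by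
            cases hd : decide (x ≠ y) <;> simp_all]
          exact (decide_eq_decide.mpr (pvSet_cons2 x y g'')).symm
        rw [hx, hy]
        rw [← hgoal]
        cases hd : decide (x ≠ y) <;> cases pvTP (c :: cs) <;>
          cases pvBadRun (true, y :: g'') <;> simp
      | false =>
        have hgoal : ((match g'' ++ c :: cs with | z :: _ => !pvIsVowel z | [] => false)
            || pvBadRun (false, y :: g'')) = pvBadRun (false, x :: y :: g'') := by
          match g'' with
          | [] => simp [pvBadRun, hc]
          | z :: g3 =>
            have hz : pvIsVowel z = false := hu z (by simp)
            simp [pvBadRun, hz]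
        rw [hx, hy]
        rw [← hgoal]
        cases hm : (match g'' ++ c :: cs with | z :: _ => !pvIsVowel z | [] => false) <;>
          cases pvTP (c :: cs) <;> cases pvBadRun (false, y :: g'') <;> simp

-- master invariant for B's fold
lemma pvRuns_master (cs : List Char) (k : Bool) (g : List Char) (hg : g ≠ [])
    (hu : ∀ x ∈ g, pvIsVowel x = k) :
    (List.foldl pvStep [(k, g)] cs).any pvBadRun = pvTP (g ++ cs) := by
  induction cs generalizing k g with
  | nil =>
    simp only [List.foldl_nil, List.append_nil, List.any_cons, List.any_nil, Bool.or_false]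
    exact pvBadRun_eq_TP k g hg hu
  | cons c cs ih =>
    by_cases hkc : pvIsVowel c = k
    · have hstep : pvStep [(k, g)] c = [(k, g ++ [c])] := by
        simp [pvStep, hkc]
      rw [List.foldl_cons, hstep,
        ih k (g ++ [c]) (by simp) (by
          intro x hx
          rcases List.mem_append.mp hx with h | h
          · exact hu x h
          · simp at h; subst h; exact hkc)]
      rw [List.append_assoc, List.singleton_append]
    · have hc' : pvIsVowel c = !k := by cases k <;> simp_all
      have hstep : pvStep [(k, g)] c = [(k, g)] ++ [(pvIsVowel c, [c])] := by
        simp [pvStep, Ne.symm hkc]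
      rw [List.foldl_cons, hstep,
        foldl_pvStep_append cs [(k, g)] [(pvIsVowel c, [c])] (by simp),
        List.any_append]
      simp only [List.any_cons, List.any_nil, Bool.or_false]
      rw [ih (pvIsVowel c) [c] (by simp) (by intro x hx; simp at hx; subst hx; rfl)]
      rw [show ([c] ++ cs) = c :: cs from rfl,
        pvTP_run_boundary k g c cs hg hu hc']

lemma pvRuns_any_eq_TP (cs : List Char) :
    (List.foldl pvStep [] cs).any pvBadRun = pvTP cs := by
  match cs with
  | [] => rfl
  | c :: cs =>
    rw [List.foldl_cons, show pvStep [] c = [(pvIsVowel c, [c])] from rfl]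
    exact pvRuns_master cs (pvIsVowel c) [c] (by simp)
      (by intro x hx; simp at hx; subst hx; rfl)

lemma canPronounce_eq_alt (words : List String) : canPronounce words = canPronounce_alt words := by
  induction words with
  | nil => rfl
  | cons w ws ih =>
    simp only [canPronounce, canPronounce_alt]
    rw [pvALoop_eq, pvTP_eq_windows, pvRuns_any_eq_TP, ih]

-- ===== VERDICT (by name: the statement is the Claim_ definition above) =====
theorem canPronounce_spec : Claim_equal_canPronounce := by
  intro words _
  exact canPronounce_eq_alt words
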